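-- pv_equiv track=rewrite | github.com/leoiec/ia-autoreflexiva | core/memory/summarizer.py | _format_events_for_prompt
-- ===== SOURCE A (Python) =====
-- from typing import List, Dict, Any
--
-- def _format_events_for_prompt(events: List[Dict[str, Any]], limit_chars: int = 3200) -> str:
--     """Format a compact list of recent events for the LLM, capped by chars."""
--     lines = []
--     for e in events:
--         tag = e.get("tag", "?")
--         title = e.get("title", "event")
--         note = (e.get("note", "") or "").strip().replace("\n\n", "\n")
--         # trim long notes
--         if len(note) > 400:
--             note = note[:400] + " …[truncated]"
--         lines.append(f"- [{tag}] {title}: {note}")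
--         if sum(len(x) for x in lines) > limit_chars:
--             lines.append("…[truncated]")
--             break
--     return "\n".join(lines)
-- ===== SOURCE B (Python) =====
-- from typing import List, Dict, Any
--
--
-- def _note_of(e: Dict[str, Any]) -> str:
--     n = (e.get("note", "") or "").strip().replace("\n\n", "\n")
--     return n if len(n) <= 400 else n[:400] + " …[truncated]"
--
--
-- def _line_of(e: Dict[str, Any]) -> str:
--     return "".join(["- [", e.get("tag", "?"), "] ", e.get("title", "event"), ": ", _note_of(e)])
--
--
-- def _format_events_for_prompt(events: List[Dict[str, Any]], limit_chars: int = 3200) -> str: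
--     lines = [_line_of(e) for e in events]
--     totals = []
--     t = 0
--     for l in lines:
--         t += len(l)
--         totals.append(t)
--     cut = next((i for i, tot in enumerate(totals) if tot > limit_chars), None)
--     if cut is None:
--         return "\n".join(lines)
--     return "\n".join(lines[:cut + 1]) + "\n…[truncated]"
-- ===== Notes on version B (the rewrite author's own statement) =====
-- stated objective: alternative
-- what changed: A interleaves formatting with a cap test that re-sums all accumulated line lengths each iteration and breaks early; B formats every event first (line built by ''.join of parts), then materialises an explicit running-prefix-totals list and finds the first index over the limit in a separate scan before slicing and joining (measured runtime about the same).
import Mathlib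
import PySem

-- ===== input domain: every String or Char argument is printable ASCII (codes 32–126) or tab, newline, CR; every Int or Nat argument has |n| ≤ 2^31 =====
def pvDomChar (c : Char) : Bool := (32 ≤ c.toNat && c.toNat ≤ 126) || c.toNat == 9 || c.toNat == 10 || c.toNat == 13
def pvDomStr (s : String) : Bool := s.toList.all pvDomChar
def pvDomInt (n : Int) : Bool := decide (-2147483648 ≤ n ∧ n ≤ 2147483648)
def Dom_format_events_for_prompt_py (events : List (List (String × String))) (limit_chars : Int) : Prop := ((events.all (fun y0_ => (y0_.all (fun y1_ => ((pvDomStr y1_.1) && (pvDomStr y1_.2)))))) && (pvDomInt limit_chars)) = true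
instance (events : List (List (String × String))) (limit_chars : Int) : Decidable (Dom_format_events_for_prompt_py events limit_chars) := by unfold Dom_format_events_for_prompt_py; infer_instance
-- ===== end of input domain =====

-- B formats every event first (helpers _note_of/_line_of, line built by "".join), then applies
-- the char cap separately: an explicit running-prefix-totals list and a first-index-over-limit
-- search, instead of A's interleaved build-and-re-sum loop with an early break.


-- ===== PORT A =====
-- the loop body's f-string and note trimming, named for readability (A builds it inline)
def pvLineA (e : List (String × String)) : String :=
  let d : PySem.Dict String String := PySem.Dict.mk e
  let tag := d.getD "tag" "?"
  let title := d.getD "title" "event"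
  let note0 := d.getD "note" ""
  let note1 := if note0 == "" then "" else note0          -- `or ""` on a str is the identity branch
  let note2 := PySem.Str.replace (PySem.Str.strip note1) "\n\n" "\n"
  let note := if PySem.Str.len note2 > 400 then
                PySem.Str.slice note2 none (some 400) ++ " …[truncated]"
              else note2
  "- [" ++ tag ++ "] " ++ title ++ ": " ++ note

-- the for-loop with its break: each step appends the line, re-sums ALL line lengths, stops early
def pvLoopA (limit_chars : Int) : List (List (String × String)) → List String → List String
  | [], lines => lines
  | e :: rest, lines =>
      let lines' := lines ++ [pvLineA e]
      if ((lines'.map PySem.Str.len).sum > limit_chars) then lines' ++ ["…[truncated]"]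
      else pvLoopA limit_chars rest lines'

def format_events_for_prompt_py (events : List (List (String × String))) (limit_chars : Int) : String :=
  PySem.Str.join "\n" (pvLoopA limit_chars events [])

-- ===== PORT B =====
def pvNoteOf (d : PySem.Dict String String) : String :=
  let n0 := d.getD "note" ""
  let n := PySem.Str.replace (PySem.Str.strip (if n0 == "" then "" else n0)) "\n\n" "\n"  -- `or ""` is the identity on str
  if PySem.Str.len n ≤ 400 then n else PySem.Str.slice n none (some 400) ++ " …[truncated]"

def pvLineOf (e : List (String × String)) : String :=
  let d : PySem.Dict String String := PySem.Dict.mk e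
  PySem.Str.join "" ["- [", d.getD "tag" "?", "] ", d.getD "title" "event", ": ", pvNoteOf d]

-- Source B's running-total loop: t starts at 0, each line appends t + len(l)
def pvTotals : Int → List String → List Int
  | _, [] => []
  | t, l :: rest =>
      let t' := t + PySem.Str.len l
      t' :: pvTotals t' rest

def format_events_for_prompt_py_alt (events : List (List (String × String))) (limit_chars : Int) : String :=
  let lines := events.map pvLineOf
  match (pvTotals 0 lines).findIdx? (fun tot => tot > limit_chars) with   -- next((i for i,tot in enumerate(totals) if tot>limit), None)
  | none => PySem.Str.join "\n" lines
  | some cut => PySem.Str.join "\n" (lines.take (cut + 1)) ++ "\n" ++ "…[truncated]"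

-- ===== PRECONDITION & SPEC =====
def Spec_format_events_for_prompt_py (events : List (List (String × String))) (limit_chars : Int) (out : String) : Prop := out = format_events_for_prompt_py_alt events limit_chars
instance (events : List (List (String × String))) (limit_chars : Int) (out : String) : Decidable (Spec_format_events_for_prompt_py events limit_chars out) := by unfold Spec_format_events_for_prompt_py; infer_instance

-- ===== CLAIM (what is proved, stated in full; the proofs are below) =====
def Claim_equal_format_events_for_prompt_py : Prop := ∀ (events : List (List (String × String))) (limit_chars : Int), Dom_format_events_for_prompt_py events limit_chars → Spec_format_events_for_prompt_py events limit_chars (format_events_for_prompt_py events limit_chars)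

-- ===== LEMMAS AND PROOFS =====

-- Chars-level: joining a nonempty list plus one more element appends sep ++ the element
theorem chars_join_snoc (sep y : List Char) : ∀ (x : List Char) (xs : List (List Char)),
    PySem.Chars.join sep ((x :: xs) ++ [y]) = PySem.Chars.join sep (x :: xs) ++ sep ++ y := by
  intro x xs
  induction xs generalizing x with
  | nil => simp [PySem.Chars.join_cons_cons, PySem.Chars.join_singleton]
  | cons z zs ih =>
      have ih' := ih z
      simp only [List.cons_append] at ih' ⊢
      rw [PySem.Chars.join_cons_cons, ih', PySem.Chars.join_cons_cons]
      simp [List.append_assoc]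

-- joining k+1 lines plus the marker = joining the k+1 lines, then "\n" and the marker
theorem join_snoc (sep y : String) (xs : List String) (h : xs ≠ []) :
    PySem.Str.join sep (xs ++ [y]) = PySem.Str.join sep xs ++ sep ++ y := by
  cases xs with
  | nil => exact absurd rfl h
  | cons x rest =>
      simp only [PySem.Str.join]
      apply String.ofList_eq.mpr
      simp only [String.toList_append, String.toList_ofList, List.map_append, List.map_cons,
        List.map_nil]
      exact chars_join_snoc sep.toList y.toList x.toList (rest.map String.toList)

-- "".join of six parts is their concatenation
theorem join6 (a b c d e f : String) :
    PySem.Str.join "" [a, b, c, d, e, f] = a ++ b ++ c ++ d ++ e ++ f := by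
  simp only [PySem.Str.join]
  apply String.ofList_eq.mpr
  simp [PySem.Chars.join_cons_cons, PySem.Chars.join_singleton, String.toList_append]

-- `s or ""` on a str: the if rebuilding it is the identity
theorem pvOrEmpty (s : String) : (if s == "" then "" else s) = s := by
  by_cases h : s = "" <;> simp [h]

-- A's inline f-string equals B's "".join of the same six parts (the note-if is the other branch)
theorem pvLineA_eq_pvLineOf (e : List (String × String)) : pvLineA e = pvLineOf e := by
  unfold pvLineA pvLineOf pvNoteOf
  simp only [pvOrEmpty, join6]
  by_cases h : PySem.Str.len (PySem.Str.replace (PySem.Str.strip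
      ((PySem.Dict.mk e).getD "note" "")) "\n\n" "\n") > 400
  · rw [if_pos h, if_neg (by omega)]
  · rw [if_neg h, if_pos (by omega)]

-- A's loop from any accumulated prefix = B's cut search over the totals continued from the
-- prefix's length sum (A re-sums the whole list each step; B carries the running total)
theorem pvLoopA_eq_cut (limit_chars : Int) (es : List (List (String × String)))
    (pre : List String) :
    pvLoopA limit_chars es pre =
      match (pvTotals ((pre.map PySem.Str.len).sum) (es.map pvLineOf)).findIdx?
          (fun tot => tot > limit_chars) with
      | none => pre ++ es.map pvLineOf
      | some cut => pre ++ (es.map pvLineOf).take (cut + 1) ++ ["…[truncated]"] := by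
  induction es generalizing pre with
  | nil => simp [pvLoopA, pvTotals]
  | cons e rest ih =>
      simp only [pvLoopA, pvTotals, List.map_cons, pvLineA_eq_pvLineOf, List.findIdx?_cons]
      have hsum : (((pre ++ [pvLineOf e]).map PySem.Str.len).sum)
          = (pre.map PySem.Str.len).sum + PySem.Str.len (pvLineOf e) := by simp
      rw [hsum]
      by_cases h : (pre.map PySem.Str.len).sum + PySem.Str.len (pvLineOf e) > limit_chars
      · simp only [h, decide_true, if_pos]
        simp
      · simp only [h, decide_false, if_false, Bool.false_eq_true]
        rw [ih (pre ++ [pvLineOf e])]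
        rw [hsum]
        cases hc : (pvTotals ((pre.map PySem.Str.len).sum + PySem.Str.len (pvLineOf e))
            (rest.map pvLineOf)).findIdx? (fun tot => tot > limit_chars) with
        | none => simp
        | some c => simp [List.take_succ_cons]

-- ===== VERDICT (by name: the statement is the Claim_ definition above) =====
theorem format_events_for_prompt_py_spec : Claim_equal_format_events_for_prompt_py := by
  intro events limit_chars _
  unfold Spec_format_events_for_prompt_py format_events_for_prompt_py format_events_for_prompt_py_alt
  rw [pvLoopA_eq_cut limit_chars events []]
  simp only [List.map_nil, List.sum_nil, List.nil_append]
  cases hc : (pvTotals 0 (events.map pvLineOf)).findIdx? (fun tot => tot > limit_chars) with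
  | none => rfl
  | some c =>
      have hne : events.map pvLineOf ≠ [] := by
        intro h
        rw [h] at hc
        simp [pvTotals] at hc
      exact join_snoc "\n" "…[truncated]" ((events.map pvLineOf).take (c + 1))
        (by simp [List.take_eq_nil_iff, hne])
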